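-- pv_equiv track=rewrite | github.com/2hwayoung/algorithm-study | 시험/toss_ex1 copy.py | solution
-- ===== SOURCE A (Python) =====
-- def solution(s):
--     answer = -1
--     for num in range(10):
--         item = str(num) * 3
--         if item in s and num > answer:
--             answer = num
--     if answer > 0:
--         answer = 100 * answer + 10 * answer + answer
--     return answer
-- ===== SOURCE B (Python) =====
-- def solution(s):
--     best = -1
--     for a, b, c in zip(s, s[1:], s[2:]):
--         if '0' <= a <= '9' and b == a and c == a:
--             d = ord(a) - 48
--             if d > best:
--                 best = d
--     return -1 if best < 0 else 111 * best
-- ===== Notes on version B (the rewrite author's own statement) =====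
-- stated objective: alternative
-- what changed: replaces the ten separate per-digit substring-membership scans over s with a single left-to-right pass over consecutive character triples that maintains the maximum tripled digit
import Mathlib
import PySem

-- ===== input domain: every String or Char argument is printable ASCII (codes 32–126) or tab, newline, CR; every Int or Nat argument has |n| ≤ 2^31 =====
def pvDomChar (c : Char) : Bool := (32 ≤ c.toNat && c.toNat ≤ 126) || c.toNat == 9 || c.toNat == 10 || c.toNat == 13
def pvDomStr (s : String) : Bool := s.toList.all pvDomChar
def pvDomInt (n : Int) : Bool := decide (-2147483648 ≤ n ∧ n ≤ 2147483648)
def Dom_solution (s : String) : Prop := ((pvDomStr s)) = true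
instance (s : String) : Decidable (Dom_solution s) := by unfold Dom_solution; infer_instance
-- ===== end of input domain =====

-- B replaces A's ten 'ddd' substring scans by one pass over consecutive character
-- triples keeping the maximum tripled digit (alternative decomposition, same cost class).

-- ===== PORT A =====
-- item = str(num) * 3
def pvItem (num : Int) : String := String.mk (PySem.List.pyRepeat (PySem.Int.toStr num).toList 3)

-- loop body: if item in s and num > answer: answer = num
def pvAStep (s : String) (answer num : Int) : Int :=
  if PySem.Str.isIn (pvItem num) s = true ∧ num > answer then num else answer

def solution (s : String) : Int :=
  let answer := (PySem.List.pyRange 0 10 1).foldl (pvAStep s) (-1)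
  if answer > 0 then 100 * answer + 10 * answer + answer else answer

-- ===== PORT B =====
-- loop body of Source B: if '0' <= a <= '9' and b == a and c == a: d = ord(a)-48; best = max
def pvBStep (best : Int) (t : (Char × Char) × Char) : Int :=
  if ('0' ≤ t.1.1 ∧ t.1.1 ≤ '9') ∧ t.1.2 = t.1.1 ∧ t.2 = t.1.1 then
    if (t.1.1.toNat : Int) - 48 > best then (t.1.1.toNat : Int) - 48 else best
  else best

def solution_alt (s : String) : Int :=
  let best := ((s.toList.zip (PySem.Str.slice s (some 1) none).toList).zip
      (PySem.Str.slice s (some 2) none).toList).foldl pvBStep (-1)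
  if best < 0 then -1 else 111 * best

-- ===== PRECONDITION & SPEC =====
def Spec_solution (s : String) (out : Int) : Prop := out = solution_alt s
instance (s : String) (out : Int) : Decidable (Spec_solution s out) := by unfold Spec_solution; infer_instance

-- ===== CLAIM (what is proved, stated in full; the proofs are below) =====
def Claim_equal_solution : Prop := ∀ (s : String), Dom_solution s → Spec_solution s (solution s)

-- ===== LEMMAS AND PROOFS =====

-- the digit-triple scan of B, on a raw char list
def pvZ3 (l : List Char) : List ((Char × Char) × Char) := (l.zip l.tail).zip l.tail.tail
def pvS (l : List Char) : Int := (pvZ3 l).foldl pvBStep (-1)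

-- a char is an ASCII digit
def pvIsDig (c : Char) : Prop := '0' ≤ c ∧ c ≤ '9'

lemma pvBStep_ge (b : Int) (t : (Char × Char) × Char) : b ≤ pvBStep b t := by
  unfold pvBStep; split_ifs <;> omega

lemma foldl_pvBStep_ge (z : List ((Char × Char) × Char)) : ∀ b : Int, b ≤ z.foldl pvBStep b := by
  induction z with
  | nil => intro b; simp
  | cons t z ih => intro b; exact le_trans (pvBStep_ge b t) (ih _)

lemma pvIsDig_toNat {c : Char} (h : pvIsDig c) : 48 ≤ c.toNat ∧ c.toNat ≤ 57 := by
  obtain ⟨h1, h2⟩ := h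
  constructor
  · exact h1
  · exact h2

lemma pvBStep_eq_max (b : Int) (hb : -1 ≤ b) (t : (Char × Char) × Char) :
    pvBStep b t = max b (pvBStep (-1) t) := by
  unfold pvBStep
  by_cases hc : ('0' ≤ t.1.1 ∧ t.1.1 ≤ '9') ∧ t.1.2 = t.1.1 ∧ t.2 = t.1.1
  · have hd : (48 : Int) ≤ (t.1.1.toNat : Int) := by
      have := (pvIsDig_toNat hc.1).1; omega
    simp only [if_pos hc]; split_ifs <;> omega
  · simp only [if_neg hc]; omega

lemma foldl_pvBStep_max (z : List ((Char × Char) × Char)) :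
    ∀ b : Int, -1 ≤ b → z.foldl pvBStep b = max b (z.foldl pvBStep (-1)) := by
  induction z with
  | nil => intro b hb; simp; omega
  | cons t z ih =>
    intro b hb
    have h1 : -1 ≤ pvBStep b t := le_trans hb (pvBStep_ge b t)
    have h2 : -1 ≤ pvBStep (-1) t := pvBStep_ge (-1) t
    have hC : -1 ≤ z.foldl pvBStep (-1) := foldl_pvBStep_ge z (-1)
    simp only [List.foldl_cons]
    rw [ih _ h1, ih _ h2, pvBStep_eq_max b hb t]
    omega

lemma pvZ3_cons3 (a b c : Char) (t : List Char) :
    pvZ3 (a :: b :: c :: t) = ((a, b), c) :: pvZ3 (b :: c :: t) := by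
  simp [pvZ3, List.zip]

lemma pvS_cons3 (a b c : Char) (t : List Char) :
    pvS (a :: b :: c :: t) = max (pvBStep (-1) ((a, b), c)) (pvS (b :: c :: t)) := by
  unfold pvS
  rw [pvZ3_cons3, List.foldl_cons]
  exact foldl_pvBStep_max _ _ (pvBStep_ge (-1) _)

lemma pvS_short (l : List Char) (h : l.length < 3) : pvS l = -1 := by
  match l, h with
  | [], _ => rfl
  | [a], _ => rfl
  | [a, b], _ => rfl
  | a :: b :: c :: t, h => simp only [List.length_cons] at h; omega

lemma pvS_tail_ge (a : Char) (l : List Char) : pvS l ≤ pvS (a :: l) := by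
  match l with
  | [] => simp [pvS_short]
  | [b] => simp [pvS_short]
  | b :: c :: t =>
    rw [pvS_cons3]
    exact le_max_right _ _

lemma pvS_ge (l : List Char) : -1 ≤ pvS l := foldl_pvBStep_ge _ _

lemma pvTrip_len {c : Char} {l : List Char} (h : [c, c, c] <:+: l) : 3 ≤ l.length := by
  have := h.length_le; simpa using this

lemma pvS_le (l : List Char) : ∀ c : Char, pvIsDig c → [c, c, c] <:+: l →
    (c.toNat : Int) - 48 ≤ pvS l := by
  induction l with
  | nil => intro c _ h; exact absurd (pvTrip_len h) (by simp)
  | cons a rest ih =>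
    intro c hd h
    rcases List.infix_cons_iff.mp h with hpre | hinf
    · -- [c,c,c] is a prefix of a :: rest
      obtain ⟨rfl, h2⟩ := List.cons_prefix_cons.mp hpre
      match rest, h2 with
      | b :: e :: t, h2 =>
        obtain ⟨rfl, h3⟩ := List.cons_prefix_cons.mp h2
        obtain ⟨rfl, _⟩ := List.cons_prefix_cons.mp h3
        rw [pvS_cons3]
        have : pvBStep (-1) ((c, c), c) = (c.toNat : Int) - 48 := by
          have h48 := pvIsDig_toNat hd
          have hd' : ('0' ≤ c ∧ c ≤ '9') := hd
          simp only [pvBStep]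
          split_ifs with h1 h2 <;>
            first
              | omega
              | exact (h1 ⟨hd', by trivial, by trivial⟩).elim
        rw [this]; exact le_max_left _ _
    · exact le_trans (ih c hd hinf) (pvS_tail_ge a rest)

lemma pvS_mem (l : List Char) :
    pvS l = -1 ∨ ∃ c : Char, pvIsDig c ∧ [c, c, c] <:+: l ∧ pvS l = (c.toNat : Int) - 48 := by
  induction l with
  | nil => left; rfl
  | cons a rest ih =>
    rcases rest with _ | ⟨b, rest'⟩
    · left; rfl
    · rcases rest' with _ | ⟨e, t⟩
      · left; rfl
      · rw [pvS_cons3]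
        by_cases hc : ('0' ≤ a ∧ a ≤ '9') ∧ b = a ∧ e = a
        · obtain ⟨hd, hb, he⟩ := hc
          rw [hb, he] at ih ⊢
          have h48 : 48 ≤ a.toNat ∧ a.toNat ≤ 57 := pvIsDig_toNat hd
          have hv : pvBStep (-1) ((a, a), a) = (a.toNat : Int) - 48 := by
            have hd' : ('0' ≤ a ∧ a ≤ '9') := hd
            simp only [pvBStep]
            split_ifs with h1 h2 <;>
              first
                | omega
                | exact (h1 ⟨hd', by trivial, by trivial⟩).elim
          rw [hv]
          have htrip : [a, a, a] <:+: a :: a :: a :: t := ⟨[], t, rfl⟩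
          rcases ih with h0 | ⟨c, hcd, hct, hcv⟩
          · right; refine ⟨a, hd, htrip, ?_⟩
            rw [h0]; omega
          · have hc48 := pvIsDig_toNat hcd
            rcases le_total ((c.toNat : Int) - 48) ((a.toNat : Int) - 48) with hle | hle
            · right; refine ⟨a, hd, htrip, by omega⟩
            · right
              refine ⟨c, hcd, hct.trans (List.suffix_cons a _).isInfix, by omega⟩
        · have hv : pvBStep (-1) ((a, b), e) = -1 := by
            simp only [pvBStep]; rw [if_neg hc]
          rw [hv]
          have hge := pvS_ge (b :: e :: t)
          rcases ih with h0 | ⟨c, hcd, hct, hcv⟩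
          · left; rw [h0]; omega
          · right
            refine ⟨c, hcd, hct.trans (List.suffix_cons a _).isInfix, by omega⟩

-- ---- A-side: the range-0..9 fold keeps the largest num whose triple occurs ----
lemma foldA_props (s : String) : ∀ (l : List Int) (ans : Int),
    (∀ n ∈ l, ans < n) → l.Pairwise (· < ·) →
    ans ≤ l.foldl (pvAStep s) ans ∧
    (l.foldl (pvAStep s) ans = ans ∨
      (l.foldl (pvAStep s) ans ∈ l ∧
        PySem.Str.isIn (pvItem (l.foldl (pvAStep s) ans)) s = true)) ∧
    (∀ n ∈ l, PySem.Str.isIn (pvItem n) s = true → n ≤ l.foldl (pvAStep s) ans) := by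
  intro l
  induction l with
  | nil => intro ans _ _; simp
  | cons n t ih =>
    intro ans hlt hpw
    have hn : ans < n := hlt n (List.mem_cons_self)
    have hpw' : t.Pairwise (· < ·) := hpw.of_cons
    have hnt : ∀ m ∈ t, n < m := fun m hm => (List.pairwise_cons.mp hpw).1 m hm
    simp only [List.foldl_cons]
    by_cases hP : PySem.Str.isIn (pvItem n) s = true
    · have hstep : pvAStep s ans n = n := by unfold pvAStep; rw [if_pos ⟨hP, hn⟩]
      rw [hstep]
      obtain ⟨h1, h2, h3⟩ := ih n hnt hpw'
      refine ⟨by omega, ?_, ?_⟩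
      · rcases h2 with h2 | ⟨h2a, h2b⟩
        · right; exact ⟨by rw [h2]; exact List.mem_cons_self, by rw [h2]; exact hP⟩
        · right; exact ⟨List.mem_cons_of_mem n h2a, h2b⟩
      · intro m hm hPm
        rcases List.mem_cons.mp hm with rfl | hm'
        · exact h1
        · exact h3 m hm' hPm
    · have hstep : pvAStep s ans n = ans := by
        unfold pvAStep; rw [if_neg (by intro h; exact hP h.1)]
      rw [hstep]
      obtain ⟨h1, h2, h3⟩ := ih ans (fun m hm => lt_trans hn (hnt m hm)) hpw'
      refine ⟨h1, ?_, ?_⟩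
      · rcases h2 with h2 | ⟨h2a, h2b⟩
        · left; exact h2
        · right; exact ⟨List.mem_cons_of_mem n h2a, h2b⟩
      · intro m hm hPm
        rcases List.mem_cons.mp hm with rfl | hm'
        · exact absurd hPm hP
        · exact h3 m hm' hPm

-- ---- digit-char / digit-int bridging ----
lemma pvDigit_cases {c : Char} (h : pvIsDig c) :
    c = '0' ∨ c = '1' ∨ c = '2' ∨ c = '3' ∨ c = '4' ∨
    c = '5' ∨ c = '6' ∨ c = '7' ∨ c = '8' ∨ c = '9' := by
  obtain ⟨hn1, hn2⟩ := pvIsDig_toNat h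
  have hval : c.toNat = 48 ∨ c.toNat = 49 ∨ c.toNat = 50 ∨ c.toNat = 51 ∨ c.toNat = 52 ∨
      c.toNat = 53 ∨ c.toNat = 54 ∨ c.toNat = 55 ∨ c.toNat = 56 ∨ c.toNat = 57 := by omega
  have hofNat : c = Char.ofNat c.toNat := by
    rcases c with ⟨v, hv⟩
    simp [Char.ofNat, Char.toNat, Char.ofNatAux, hv]
  rcases hval with h | h | h | h | h | h | h | h | h | h <;>
    (rw [hofNat, h]; decide)

lemma pvItem_spec (n : Int) (h0 : 0 ≤ n) (h1 : n < 10) :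
    ∃ c : Char, pvIsDig c ∧ (c.toNat : Int) - 48 = n ∧ (pvItem n).toList = [c, c, c] := by
  interval_cases n
  · exact ⟨'0', ⟨by decide, by decide⟩, by decide, by decide⟩
  · exact ⟨'1', ⟨by decide, by decide⟩, by decide, by decide⟩
  · exact ⟨'2', ⟨by decide, by decide⟩, by decide, by decide⟩
  · exact ⟨'3', ⟨by decide, by decide⟩, by decide, by decide⟩
  · exact ⟨'4', ⟨by decide, by decide⟩, by decide, by decide⟩
  · exact ⟨'5', ⟨by decide, by decide⟩, by decide, by decide⟩
  · exact ⟨'6', ⟨by decide, by decide⟩, by decide, by decide⟩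
  · exact ⟨'7', ⟨by decide, by decide⟩, by decide, by decide⟩
  · exact ⟨'8', ⟨by decide, by decide⟩, by decide, by decide⟩
  · exact ⟨'9', ⟨by decide, by decide⟩, by decide, by decide⟩

lemma pvDigit_item (c : Char) (h : pvIsDig c) :
    0 ≤ (c.toNat : Int) - 48 ∧ (c.toNat : Int) - 48 < 10 ∧
      (pvItem ((c.toNat : Int) - 48)).toList = [c, c, c] := by
  rcases pvDigit_cases h with rfl | rfl | rfl | rfl | rfl | rfl | rfl | rfl | rfl | rfl <;>
    exact ⟨by decide, by decide, by decide⟩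

-- B's fold in solution_alt is pvS of the char list
lemma alt_eq_pvS (s : String) :
    solution_alt s = if pvS s.toList < 0 then -1 else 111 * pvS s.toList := by
  unfold solution_alt pvS pvZ3
  have h1 : (PySem.Str.slice s (some 1) none).toList = s.toList.tail := by
    simp [PySem.List.slice_from_one]
  have h2 : (PySem.Str.slice s (some 2) none).toList = s.toList.tail.tail := by
    have hbr : (PySem.Str.slice s (some 2) none).toList
        = PySem.List.slice s.toList (some 2) none := by simp
    rw [hbr, PySem.List.slice_from s.toList (by omega : (0:Int) ≤ 2)]
    rcases s.toList with _ | ⟨x, _ | ⟨y, l⟩⟩ <;> simp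
  rw [h1, h2]

-- the two results coincide
lemma resA_eq_pvS (s : String) :
    (PySem.List.pyRange 0 10 1).foldl (pvAStep s) (-1) = pvS s.toList := by
  obtain ⟨hge, hmem, hub⟩ := foldA_props s (PySem.List.pyRange 0 10 1) (-1)
    (by intro n hn; rw [PySem.List.mem_pyRange_one] at hn; omega)
    (PySem.List.pairwise_lt_pyRange_one 0 10)
  set resA := (PySem.List.pyRange 0 10 1).foldl (pvAStep s) (-1) with hres
  rcases pvS_mem s.toList with hS | ⟨c, hcd, hct, hcv⟩
  · -- no digit triple in s: resA must be -1 too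
    rcases hmem with h | ⟨hin, hP⟩
    · omega
    · exfalso
      rw [PySem.List.mem_pyRange_one] at hin
      obtain ⟨c, hcd, hcv, hclist⟩ := pvItem_spec resA hin.1 hin.2
      have hinf : [c, c, c] <:+: s.toList := by
        have := (PySem.Str.isIn_iff_infix (pvItem resA) s).mp hP
        rwa [hclist] at this
      have := pvS_le s.toList c hcd hinf
      omega
  · -- maximal tripled digit c: both sides equal c - 48
    have h48 := pvIsDig_toNat hcd
    obtain ⟨hn0, hn1, hclist⟩ := pvDigit_item c hcd
    have hPn : PySem.Str.isIn (pvItem ((c.toNat : Int) - 48)) s = true := by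
      rw [PySem.Str.isIn_iff_infix, hclist]; exact hct
    have hnmem : ((c.toNat : Int) - 48) ∈ PySem.List.pyRange 0 10 1 := by
      rw [PySem.List.mem_pyRange_one]; omega
    have hlb := hub _ hnmem hPn
    -- and resA ≤ pvS
    rcases hmem with h | ⟨hin, hP⟩
    · omega
    · rw [PySem.List.mem_pyRange_one] at hin
      obtain ⟨c', hcd', hcv', hclist'⟩ := pvItem_spec resA hin.1 hin.2
      have hinf' : [c', c', c'] <:+: s.toList := by
        have := (PySem.Str.isIn_iff_infix (pvItem resA) s).mp hP
        rwa [hclist'] at this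
      have := pvS_le s.toList c' hcd' hinf'
      omega

-- ===== VERDICT (by name: the statement is the Claim_ definition above) =====
theorem solution_spec : Claim_equal_solution := by
  intro s _
  unfold Spec_solution
  rw [alt_eq_pvS]
  have hA : solution s =
      if pvS s.toList > 0 then
        100 * pvS s.toList + 10 * pvS s.toList + pvS s.toList
      else pvS s.toList := by
    simp only [solution]
    rw [resA_eq_pvS]
  rw [hA]
  have hge := pvS_ge s.toList
  split_ifs <;> omega
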